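-- pv_equiv track=rewrite | github.com/danhtran2mind/Text2Music-Composer | src/text2music_composer/train.py | process_train_args
-- ===== SOURCE A (Python) =====
-- from typing import Dict, List, Optional
--
-- def process_train_args(train_cmd: List[str], train_args: List[str]) -> List[str]:
--     """
--     Process train_args to replace duplicate arguments in train_cmd and append non-duplicates.
--
--     Args:
--         train_cmd (List[str]): The original training command list.
--         train_args (List[str]): Additional arguments to process, supporting both - and -- prefixes.
--
--     Returns:
--         List[str]: The updated training command with duplicates replaced and non-duplicates appended.
--     """
--     # Parse train_args into a dictionary
--     train_args_dict = {}
--     i = 0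
--     while i < len(train_args):
--         if train_args[i].startswith('-'):
--             key = train_args[i]
--             value = train_args[i + 1] if i + 1 < len(train_args) and not train_args[i + 1].startswith('-') else None
--             train_args_dict[key] = value
--             i += 2 if value else 1
--         else:
--             i += 1
--
--     # Process train_cmd, replacing values for duplicate keys and keeping first occurrence
--     new_cmd = []
--     seen_keys = set()
--     i = 0
--     while i < len(train_cmd):
--         if train_cmd[i].startswith('-'):
--             key = train_cmd[i]
--             if key not in seen_keys:
--                 seen_keys.add(key)
--                 new_cmd.append(key)
--                 # Use value from train_args_dict if available, else use train_cmd's value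
--                 if key in train_args_dict:
--                     if train_args_dict[key] is not None:
--                         new_cmd.append(train_args_dict[key])
--                     # Remove processed key from train_args_dict
--                     del train_args_dict[key]
--                     # Skip the original value in train_cmd
--                     i += 2 if i + 1 < len(train_cmd) and not train_cmd[i + 1].startswith('-') else 1
--                 else:
--                     # Keep original value from train_cmd
--                     if i + 1 < len(train_cmd) and not train_cmd[i + 1].startswith('-'):
--                         new_cmd.append(train_cmd[i + 1])
--                         i += 2
--                     else:
--                         i += 1
--             else:
--                 # Skip duplicate key and its value (if any)
--                 i += 2 if i + 1 < len(train_cmd) and not train_cmd[i + 1].startswith('-') else 1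
--         else:
--             new_cmd.append(train_cmd[i])
--             i += 1
--
--     # Append remaining non-duplicate train_args
--     for key, value in train_args_dict.items():
--         new_cmd.append(key)
--         if value is not None:
--             new_cmd.append(value)
--
--     return new_cmd
-- ===== SOURCE B (Python) =====
-- def _pairs(tokens):
--     """Tokenize into (key, value) pairs: flag tokens pair with the next token
--     iff it does not start with '-'; stray positionals become (None, tok)."""
--     out = []
--     i = 0
--     n = len(tokens)
--     while i < n:
--         t = tokens[i]
--         if t.startswith('-'):
--             if i + 1 < n and not tokens[i + 1].startswith('-'):
--                 out.append((t, tokens[i + 1]))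
--                 i += 2
--             else:
--                 out.append((t, None))
--                 i += 1
--         else:
--             out.append((None, t))
--             i += 1
--     return out
--
--
-- def process_train_args(train_cmd, train_args):
--     overrides = {}
--     for k, v in _pairs(train_args):
--         if k is not None:
--             overrides[k] = v
--     new_cmd = []
--     seen = set()
--     for k, v in _pairs(train_cmd):
--         if k is None:
--             new_cmd.append(v)
--         elif k not in seen:
--             seen.add(k)
--             new_cmd.append(k)
--             if k in overrides:
--                 ov = overrides.pop(k)
--                 if ov is not None:
--                     new_cmd.append(ov)
--             elif v is not None:
--                 new_cmd.append(v)
--     for k, v in overrides.items():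
--         new_cmd.append(k)
--         if v is not None:
--             new_cmd.append(v)
--     return new_cmd
-- ===== Notes on version B (the rewrite author's own statement) =====
-- stated objective: alternative
-- what changed: Replaces A's two index-driven while-loops with lookahead arithmetic by a single shared tokenizer that turns a token list into (key, value) pairs, after which the override dict and the merge are plain folds over those pairs.
import Mathlib
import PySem

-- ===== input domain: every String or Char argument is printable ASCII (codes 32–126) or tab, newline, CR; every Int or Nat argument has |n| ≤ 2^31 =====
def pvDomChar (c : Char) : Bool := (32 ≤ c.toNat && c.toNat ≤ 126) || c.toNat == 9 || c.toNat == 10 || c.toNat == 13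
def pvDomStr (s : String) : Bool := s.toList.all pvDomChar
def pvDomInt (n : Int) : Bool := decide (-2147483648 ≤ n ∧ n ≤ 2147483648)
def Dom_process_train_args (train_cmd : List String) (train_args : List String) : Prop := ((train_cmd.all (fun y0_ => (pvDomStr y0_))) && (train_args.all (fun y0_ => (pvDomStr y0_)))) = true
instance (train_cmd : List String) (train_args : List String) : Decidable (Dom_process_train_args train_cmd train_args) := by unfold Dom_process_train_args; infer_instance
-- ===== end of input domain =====

-- B restructures A's two index-driven while-loops as a shared tokenizer producing
-- (key, value) pairs followed by plain folds; same return value, different decomposition.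

-- ===== PORT A =====

-- final `for key, value in train_args_dict.items(): …` loop (identical in A and B)
def pvAppendRemaining (acc : List String) (d : PySem.Dict String (Option String)) : List String :=
  d.items.foldl (fun a kv =>
    match kv.2 with
    | some v => (a ++ [kv.1]) ++ [v]
    | none => a ++ [kv.1]) acc

-- A's first while-loop: parse train_args into a dict (i += 2 iff the value is truthy)
def pvParseA : List String → PySem.Dict String (Option String) → PySem.Dict String (Option String)
  | [], d => d
  | t :: rest, d =>
    if PySem.Str.startswith t "-" then
      match rest with
      | v :: rest2 =>
        if !PySem.Str.startswith v "-" then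
          if v ≠ "" then pvParseA rest2 (d.insert t (some v))
          else pvParseA (v :: rest2) (d.insert t (some v))
        else pvParseA (v :: rest2) (d.insert t none)
      | [] => pvParseA [] (d.insert t none)
    else pvParseA rest d

-- A's second while-loop; live state (new_cmd, seen_keys, train_args_dict)
def pvLoopA : List String → List String × PySem.Set String × PySem.Dict String (Option String) →
    List String × PySem.Set String × PySem.Dict String (Option String)
  | [], st => st
  | t :: rest, (acc, seen, d) =>
    if PySem.Str.startswith t "-" then
      if !(PySem.Set.contains seen t) then
        if d.contains t then
          match rest with
          | v :: rest2 =>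
            if !PySem.Str.startswith v "-" then
              pvLoopA rest2 ((match d.get? t with
                | some (some w) => (acc ++ [t]) ++ [w]
                | _ => acc ++ [t]), PySem.Set.add seen t, d.erase t)
            else
              pvLoopA (v :: rest2) ((match d.get? t with
                | some (some w) => (acc ++ [t]) ++ [w]
                | _ => acc ++ [t]), PySem.Set.add seen t, d.erase t)
          | [] => pvLoopA [] ((match d.get? t with
              | some (some w) => (acc ++ [t]) ++ [w]
              | _ => acc ++ [t]), PySem.Set.add seen t, d.erase t)
        else
          match rest with
          | v :: rest2 =>
            if !PySem.Str.startswith v "-" then pvLoopA rest2 ((acc ++ [t]) ++ [v], PySem.Set.add seen t, d)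
            else pvLoopA (v :: rest2) (acc ++ [t], PySem.Set.add seen t, d)
          | [] => pvLoopA [] (acc ++ [t], PySem.Set.add seen t, d)
      else
        match rest with
        | v :: rest2 =>
          if !PySem.Str.startswith v "-" then pvLoopA rest2 (acc, seen, d)
          else pvLoopA (v :: rest2) (acc, seen, d)
        | [] => pvLoopA [] (acc, seen, d)
    else pvLoopA rest (acc ++ [t], seen, d)

def process_train_args (train_cmd : List String) (train_args : List String) : List String :=
  let d := pvParseA train_args PySem.Dict.empty
  let st := pvLoopA train_cmd ([], PySem.Set.empty, d)
  pvAppendRemaining st.1 st.2.2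

-- ===== PORT B =====

-- B's tokenizer `_pairs`: (some key, value?) for flag tokens, (none, some tok) for positionals
def pvPairs : List String → List (Option String × Option String)
  | [] => []
  | t :: rest =>
    if PySem.Str.startswith t "-" then
      match rest with
      | v :: rest2 =>
        if !PySem.Str.startswith v "-" then (some t, some v) :: pvPairs rest2
        else (some t, none) :: pvPairs (v :: rest2)
      | [] => (some t, none) :: pvPairs []
    else (none, some t) :: pvPairs rest

-- build the override dict: last wins
def pvOvStep (d : PySem.Dict String (Option String)) (kv : Option String × Option String) :
    PySem.Dict String (Option String) :=
  match kv.1 with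
  | some k => d.insert k kv.2
  | none => d

-- one merge step of B's for-loop over the pairs of train_cmd
def pvMergeStep (st : List String × PySem.Set String × PySem.Dict String (Option String))
    (kv : Option String × Option String) :
    List String × PySem.Set String × PySem.Dict String (Option String) :=
  let acc := st.1; let seen := st.2.1; let ov := st.2.2
  match kv.1 with
  | none =>
    match kv.2 with
    | some v => (acc ++ [v], seen, ov)
    | none => (acc, seen, ov)
  | some k =>
    if PySem.Set.contains seen k then (acc, seen, ov)
    else
      let seen' := PySem.Set.add seen k
      let acc' := acc ++ [k]
      if ov.contains k then
        ((match ov.get? k with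
          | some (some w) => acc' ++ [w]
          | _ => acc'), seen', ov.erase k)
      else
        match kv.2 with
        | some v => (acc' ++ [v], seen', ov)
        | none => (acc', seen', ov)

def process_train_args_alt (train_cmd : List String) (train_args : List String) : List String :=
  let ov := (pvPairs train_args).foldl pvOvStep PySem.Dict.empty
  let st := (pvPairs train_cmd).foldl pvMergeStep ([], PySem.Set.empty, ov)
  pvAppendRemaining st.1 st.2.2

-- ===== PRECONDITION & SPEC =====
def Spec_process_train_args (train_cmd : List String) (train_args : List String) (out : List String) : Prop := out = process_train_args_alt train_cmd train_args
instance (train_cmd : List String) (train_args : List String) (out : List String) : Decidable (Spec_process_train_args train_cmd train_args out) := by unfold Spec_process_train_args; infer_instance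

-- ===== CLAIM (what is proved, stated in full; the proofs are below) =====
def Claim_equal_process_train_args : Prop := ∀ (train_cmd : List String) (train_args : List String), Dom_process_train_args train_cmd train_args → Spec_process_train_args train_cmd train_args (process_train_args train_cmd train_args)

-- ===== LEMMAS AND PROOFS =====

-- A's args-parsing loop builds exactly the fold of pvOvStep over the pairs
theorem parse_eq_fold (args : List String) (d : PySem.Dict String (Option String)) :
    pvParseA args d = (pvPairs args).foldl pvOvStep d := by
  induction args, d using pvParseA.induct <;>
    simp_all [pvParseA, pvPairs, pvOvStep]
  · rename_i v rest2 h1 h2 h3 ih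
    cases rest2 <;> simp_all [pvParseA, pvPairs, pvOvStep]
  · rename_i t rest d h ih
    cases rest <;> simp_all [pvParseA, pvPairs, pvOvStep]

-- A's cmd loop is the fold of pvMergeStep over the pairs of train_cmd
theorem loop_eq_fold (cmd : List String)
    (st : List String × PySem.Set String × PySem.Dict String (Option String)) :
    pvLoopA cmd st = (pvPairs cmd).foldl pvMergeStep st := by
  induction cmd, st using pvLoopA.induct <;>
    simp_all [pvLoopA, pvPairs, pvMergeStep]
  · rename_i t rest acc seen d h ih
    cases rest <;> simp_all [pvLoopA, pvPairs, pvMergeStep]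

-- ===== VERDICT (by name: the statement is the Claim_ definition above) =====
theorem process_train_args_spec : Claim_equal_process_train_args := by
  intro train_cmd train_args _
  unfold Spec_process_train_args process_train_args process_train_args_alt
  simp only [parse_eq_fold, loop_eq_fold]
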